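-- pv_equiv track=rewrite | github.com/Maier007/Rhapsography | musicGen.py | generateScale
-- ===== SOURCE A (Python) =====
-- def generateScale(startLet, majorBool):
--     generalScale = ['C', 'C#', 'D', 'D#', 'E', 'F', 'F#', 'G', 'G#', 'A', 'A#', 'B']
--     indStartLetter = generalScale.index(startLet)
--
--     #reorients scale to have first letter be the chosen letter
--     generalScale = generalScale[indStartLetter:] + generalScale[:indStartLetter]
--
--     notes = []
--     if majorBool == 1:  #if major
--         for i in [0, 2, 4, 5, 7, 9, 11]:
--             notes.append(generalScale[i])
--     else: #if minor
--         for i in [0, 2, 3, 5, 7, 8, 11]: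
--             notes.append(generalScale[i])
--     return notes
-- ===== SOURCE B (Python) =====
-- def generateScale(startLet, majorBool):
--     generalScale = ['C', 'C#', 'D', 'D#', 'E', 'F', 'F#', 'G', 'G#', 'A', 'A#', 'B']
--     pos = generalScale.index(startLet)
--     steps = [2, 2, 1, 2, 2, 2] if majorBool == 1 else [2, 1, 2, 2, 1, 3]
--     notes = [generalScale[pos]]
--     for step in steps:
--         pos = (pos + step) % 12
--         notes.append(generalScale[pos])
--     return notes
-- ===== Notes on version B (the rewrite author's own statement) =====
-- stated objective: alternative
-- what changed: B drops the list rotation/slicing entirely: it keeps a running position advanced by an interval pattern (major [2,2,1,2,2,2], minor [2,1,2,2,1,3]) modulo 12 and indexes the original fixed list, instead of rotating the list and reading fixed absolute indices.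
import Mathlib
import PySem

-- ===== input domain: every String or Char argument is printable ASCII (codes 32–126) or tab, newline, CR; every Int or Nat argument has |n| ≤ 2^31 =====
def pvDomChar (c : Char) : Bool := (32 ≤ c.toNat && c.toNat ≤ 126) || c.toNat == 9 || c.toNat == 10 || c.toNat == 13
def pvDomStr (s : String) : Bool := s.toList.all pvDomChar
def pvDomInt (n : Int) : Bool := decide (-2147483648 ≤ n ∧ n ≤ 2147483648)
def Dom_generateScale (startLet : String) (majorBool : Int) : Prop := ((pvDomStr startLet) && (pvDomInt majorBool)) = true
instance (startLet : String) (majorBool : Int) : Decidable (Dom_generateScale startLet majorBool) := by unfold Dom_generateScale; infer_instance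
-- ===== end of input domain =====

-- B replaces the rotate-then-fixed-indices scheme by a running position advanced by an
-- interval pattern modulo 12 over the original fixed list (objective: alternative decomposition).

-- ===== PORT A =====
def pvNotes : List String := ["C", "C#", "D", "D#", "E", "F", "F#", "G", "G#", "A", "A#", "B"]

-- literal port of A: find the index, rotate the list by slicing, then read fixed indices.
def generateScale (startLet : String) (majorBool : Int) : List String :=
  let generalScale := pvNotes
  let indStartLetter : Int := (PySem.List.index? generalScale startLet).getD 0
  let generalScale := PySem.List.slice generalScale (some indStartLetter) none ++
                      PySem.List.slice generalScale none (some indStartLetter)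
  let idxs : List Int := if majorBool = 1 then [0, 2, 4, 5, 7, 9, 11] else [0, 2, 3, 5, 7, 8, 11]
  idxs.foldl (fun notes i => notes ++ [(PySem.List.pyGet? generalScale i).getD ""]) []

-- ===== PORT B =====
-- literal port of B: running position accumulator advanced by the step pattern mod 12.
def generateScale_alt (startLet : String) (majorBool : Int) : List String :=
  let generalScale := pvNotes
  let pos : Int := (PySem.List.index? generalScale startLet).getD 0
  let steps : List Int := if majorBool = 1 then [2, 2, 1, 2, 2, 2] else [2, 1, 2, 2, 1, 3]
  let init := ([(PySem.List.pyGet? generalScale pos).getD ""], pos)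
  (steps.foldl (fun st step =>
      let pos := PySem.Int.mod (st.2 + step) 12
      (st.1 ++ [(PySem.List.pyGet? generalScale pos).getD ""], pos)) init).1

-- ===== PRECONDITION & SPEC =====
-- Pre_ excludes exactly the inputs where Python's list.index raises ValueError (startLet not one of the 12 notes); both A and B raise there.
def Pre_generateScale (startLet : String) (majorBool : Int) : Prop := startLet ∈ pvNotes
instance (startLet : String) (majorBool : Int) : Decidable (Pre_generateScale startLet majorBool) := by unfold Pre_generateScale; infer_instance
def pvWitness_generateScale : String × Int := ("C", 1)

def Spec_generateScale (startLet : String) (majorBool : Int) (out : List String) : Prop := out = generateScale_alt startLet majorBool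
instance (startLet : String) (majorBool : Int) (out : List String) : Decidable (Spec_generateScale startLet majorBool out) := by unfold Spec_generateScale; infer_instance

-- ===== CLAIM =====
def Claim_equal_generateScale : Prop := ∀ (startLet : String) (majorBool : Int), Dom_generateScale startLet majorBool → Pre_generateScale startLet majorBool → Spec_generateScale startLet majorBool (generateScale startLet majorBool)

-- ===== LEMMAS AND PROOFS =====
set_option maxHeartbeats 1000000 in
theorem pv_agree (s : String) (hs : s ∈ pvNotes) (m : Int) :
    generateScale s m = generateScale_alt s m := by
  rcases eq_or_ne m 1 with hm | hm
  · subst hm; fin_cases hs <;> decide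
  · simp only [generateScale, generateScale_alt, if_neg hm]
    fin_cases hs <;> decide

-- ===== VERDICT =====
theorem generateScale_spec : Claim_equal_generateScale := by
  intro s m _ hpre
  unfold Spec_generateScale
  exact pv_agree s hpre m
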